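-- pv_equiv track=rewrite | github.com/vpc-ccg/freddie | py/find_canonical_exons_iteratively.py | get_stretches_of_zeros
-- ===== SOURCE A (Python) =====
-- def get_stretches_of_zeros(l):
--     result = list()
--     s = len(l)
--     for i,v in enumerate(l):
--         if l[i] == 1:
--             if s < i-1:
--                 result.append([s,i])
--             s = i
--     return result
-- ===== SOURCE B (Python) =====
-- def get_stretches_of_zeros(l):
--     # Run-length encode the list by whether each element equals 1,
--     # then emit every interior non-one run as [start - 1, start + length]
--     # (the indices of the flanking ones).
--     runs = []   # closed runs: [key, start, length]
--     cur = None  # currently open run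
--     for i, v in enumerate(l):
--         k = (v == 1)
--         if cur is not None and cur[0] == k:
--             cur[2] += 1
--         else:
--             if cur is not None:
--                 runs.append(cur)
--             cur = [k, i, 1]
--     if cur is not None:
--         runs.append(cur)
--     return [[p - 1, p + n] for k, p, n in runs[1:-1] if not k]
-- ===== Notes on version B (the rewrite author's own statement) =====
-- stated objective: alternative
-- what changed: Replaces A's single pass with a running previous-one sentinel (initialised to len(l)) by run-length encoding the (v == 1) mask into maximal runs and then emitting [start-1, start+length] for every interior non-one run.
import Mathlib
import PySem

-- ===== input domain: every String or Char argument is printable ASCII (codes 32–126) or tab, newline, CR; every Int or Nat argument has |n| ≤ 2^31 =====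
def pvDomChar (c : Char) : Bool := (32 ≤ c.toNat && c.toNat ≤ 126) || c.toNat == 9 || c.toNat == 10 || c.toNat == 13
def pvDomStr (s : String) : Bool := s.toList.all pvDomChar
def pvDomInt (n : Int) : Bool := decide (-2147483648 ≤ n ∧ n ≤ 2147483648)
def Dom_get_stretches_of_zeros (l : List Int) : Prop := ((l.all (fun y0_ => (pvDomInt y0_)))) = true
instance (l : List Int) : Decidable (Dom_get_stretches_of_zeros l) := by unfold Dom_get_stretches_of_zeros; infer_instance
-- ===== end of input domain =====

-- B replaces A's running previous-one sentinel with run-length encoding of the (v == 1) mask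
-- followed by a pass emitting each interior non-one run (alternative decomposition, same O(n) cost).
-- ===== PORT A =====
-- literal transliteration of A: fold over enumerate(l) carrying (result, s), reading l[i]
def get_stretches_of_zeros (l : List Int) : List (List Int) :=
  (PySem.List.enumerate l 0).foldl
    (fun (st : List (List Int) × Int) (iv : Int × Int) =>
      if PySem.List.pyGet? l iv.1 = some 1 then
        ((if st.2 < iv.1 - 1 then st.1 ++ [[st.2, iv.1]] else st.1), iv.1)
      else st)
    ([], (l.length : Int)) |>.1

-- ===== PORT B =====
-- literal transliteration of B: run-length encode by (v == 1) into closed runs + an open run cur,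
-- close the trailing run, then emit [p-1, p+n] for every non-one run (k, p, n) in runs[1:-1]
def get_stretches_of_zeros_alt (l : List Int) : List (List Int) :=
  let st := (PySem.List.enumerate l 0).foldl
    (fun (st : List (Bool × Int × Int) × Option (Bool × Int × Int)) (iv : Int × Int) =>
      let k : Bool := decide (iv.2 = 1)
      match st.2 with
      | some c =>
        if c.1 = k then (st.1, some (c.1, c.2.1, c.2.2 + 1))
        else (st.1 ++ [c], some (k, iv.1, 1))
      | none => (st.1, some (k, iv.1, 1)))
    ([], none)
  let runs := st.1 ++ st.2.toList
  (PySem.List.slice runs (some 1) (some (-1))).filterMap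
    (fun r => if r.1 then none else some [r.2.1 - 1, r.2.1 + r.2.2])

-- ===== PRECONDITION & SPEC =====
def Spec_get_stretches_of_zeros (l : List Int) (out : List (List Int)) : Prop := out = get_stretches_of_zeros_alt l
instance (l : List Int) (out : List (List Int)) : Decidable (Spec_get_stretches_of_zeros l out) := by unfold Spec_get_stretches_of_zeros; infer_instance

-- ===== CLAIM (what is proved, stated in full; the proofs are below) =====
def Claim_equal_get_stretches_of_zeros : Prop := ∀ (l : List Int), Dom_get_stretches_of_zeros l → Spec_get_stretches_of_zeros l (get_stretches_of_zeros l)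

-- ===== LEMMAS AND PROOFS =====

-- A-side characterisation: gaps between consecutive elements of the ones-index list
def pvGaps (s : Int) : List Int → List (List Int)
  | [] => []
  | a :: t => (if s < a - 1 then [[s, a]] else []) ++ pvGaps a t

-- headless form of pvGaps (A's sentinel never fires on the first one)
def pvPairGaps : List Int → List (List Int)
  | [] => []
  | a :: t => pvGaps a t

-- the final value of A's sentinel after scanning the index list
def pvLast (s : Int) : List Int → Int
  | [] => s
  | a :: t => pvLast a t

-- indices (starting at k) of the elements equal to 1
def pvOnes (k : Int) : List Int → List Int
  | [] => []
  | v :: t => (if v = 1 then [k] else []) ++ pvOnes (k + 1) t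

-- B's fold step, named (definitionally equal to the lambda in the port of B)
def pvStep (st : List (Bool × Int × Int) × Option (Bool × Int × Int)) (iv : Int × Int) :
    List (Bool × Int × Int) × Option (Bool × Int × Int) :=
  match st.2 with
  | some c =>
    if c.1 = decide (iv.2 = 1) then (st.1, some (c.1, c.2.1, c.2.2 + 1))
    else (st.1 ++ [c], some (decide (iv.2 = 1), iv.1, 1))
  | none => (st.1, some (decide (iv.2 = 1), iv.1, 1))

-- B-side characterisation: cons-based run-length encoding
def pvMergeHead (c : Bool × Int × Int) : List (Bool × Int × Int) → List (Bool × Int × Int)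
  | [] => [c]
  | r :: rest => if r.1 = c.1 then (c.1, c.2.1, c.2.2 + r.2.2) :: rest else c :: r :: rest

def pvRle (k : Int) : List Int → List (Bool × Int × Int)
  | [] => []
  | v :: t => pvMergeHead (decide (v = 1), k, 1) (pvRle (k + 1) t)

-- consecutive integers p, p+1, …, p+m-1
def pvConsec (p : Int) : Nat → List Int
  | 0 => []
  | Nat.succ m => p :: pvConsec (p + 1) m

-- the one-indices a run list denotes
def pvRunsOnes : List (Bool × Int × Int) → List Int
  | [] => []
  | r :: rest => (if r.1 then pvConsec r.2.1 r.2.2.toNat else []) ++ pvRunsOnes rest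

-- B's emission function
def pvH (r : Bool × Int × Int) : Option (List Int) :=
  if r.1 then none else some [r.2.1 - 1, r.2.1 + r.2.2]

-- well-formedness of a run list: starts at k, positive lengths, contiguous, alternating, prev key ob
def pvWF (k : Int) (ob : Option Bool) : List (Bool × Int × Int) → Prop
  | [] => True
  | r :: rest => r.2.1 = k ∧ 1 ≤ r.2.2 ∧ ob ≠ some r.1 ∧ pvWF (k + r.2.2) (some r.1) rest

theorem pvOnes_lt {x k : Int} : ∀ {t : List Int}, x ∈ pvOnes k t → x < k + t.length := by
  intro t
  induction t generalizing k with
  | nil => simp [pvOnes]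
  | cons v t ih =>
    intro hx
    simp only [pvOnes, List.mem_append] at hx
    have h0 : (0:Int) ≤ (t.length : Int) := Int.natCast_nonneg _
    simp only [List.length_cons]
    push_cast
    rcases hx with hx | hx
    · have hxk : x = k := by split at hx <;> simp_all
      omega
    · have := ih hx
      omega

theorem pvA_fold (t : List Int) : ∀ (k : Int) (res : List (List Int)) (s : Int),
    (PySem.List.enumerate t k).foldl
      (fun (st : List (List Int) × Int) (iv : Int × Int) =>
        if iv.2 = 1 then
          ((if st.2 < iv.1 - 1 then st.1 ++ [[st.2, iv.1]] else st.1), iv.1)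
        else st)
      (res, s)
    = (res ++ pvGaps s (pvOnes k t), pvLast s (pvOnes k t)) := by
  induction t with
  | nil => intro k res s; simp [PySem.List.enumerate_nil, pvOnes, pvGaps, pvLast]
  | cons v t ih =>
    intro k res s
    rw [PySem.List.enumerate_cons]
    simp only [List.foldl_cons]
    by_cases hv : v = 1
    · by_cases hs : s < k - 1
      · simp [hv, hs, ih, pvOnes, pvGaps, pvLast, List.append_assoc]
      · simp [hv, hs, ih, pvOnes, pvGaps, pvLast]
    · simp [hv, ih, pvOnes]

theorem pvGaps_sentinel (n : Int) : ∀ (xs : List Int), (∀ x ∈ xs, x < n) →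
    pvGaps n xs = pvPairGaps xs := by
  intro xs h
  cases xs with
  | nil => rfl
  | cons a t =>
    have ha : a < n := h a (List.mem_cons_self ..)
    simp [pvGaps, pvPairGaps]
    omega

-- the head of pvMergeHead carries c's key
theorem pvMergeHead_key (c : Bool × Int × Int) (r : List (Bool × Int × Int)) :
    ∃ q rest, pvMergeHead c r = (c.1, q) :: rest := by
  cases r with
  | nil => exact ⟨c.2, [], rfl⟩
  | cons x rest =>
    by_cases h : x.1 = c.1
    · exact ⟨(c.2.1, c.2.2 + x.2.2), rest, by simp [pvMergeHead, h]⟩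
    · exact ⟨c.2, x :: rest, by simp [pvMergeHead, h]⟩

-- merging twice with the same key adds the lengths
theorem pvMergeHead_merge (b : Bool) (p m k n : Int) (r : List (Bool × Int × Int)) :
    pvMergeHead (b, p, m) (pvMergeHead (b, k, n) r) = pvMergeHead (b, p, m + n) r := by
  cases r with
  | nil => simp [pvMergeHead]
  | cons x rest =>
    by_cases h : x.1 = b
    · simp [pvMergeHead, h, add_assoc]
    · simp [pvMergeHead, h]

-- B's fold, flattened, computes the run-length encoding
theorem pvB_fold : ∀ (t : List Int) (k : Int) (rs : List (Bool × Int × Int)) (c : Bool × Int × Int),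
    ((PySem.List.enumerate t k).foldl pvStep (rs, some c)).1
      ++ ((PySem.List.enumerate t k).foldl pvStep (rs, some c)).2.toList
    = rs ++ pvMergeHead c (pvRle k t) := by
  intro t
  induction t with
  | nil => intro k rs c; simp [PySem.List.enumerate_nil, pvRle, pvMergeHead]
  | cons v t ih =>
    intro k rs c
    rw [PySem.List.enumerate_cons]
    simp only [List.foldl_cons]
    obtain ⟨cb, cp, cn⟩ := c
    by_cases h : cb = decide (v = 1)
    · have hstep : pvStep (rs, some (cb, cp, cn)) (k, v)
          = (rs, some (cb, cp, cn + 1)) := by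
        simp [pvStep, h]
      rw [hstep, ih]
      simp only [pvRle, h]
      rw [pvMergeHead_merge]
    · have hstep : pvStep (rs, some (cb, cp, cn)) (k, v)
          = (rs ++ [(cb, cp, cn)], some (decide (v = 1), k, 1)) := by
        simp [pvStep, h]
      rw [hstep, ih]
      simp only [pvRle]
      obtain ⟨q, rest, hq⟩ := pvMergeHead_key (decide (v = 1), k, 1) (pvRle (k + 1) t)
      rw [hq]
      have hm : pvMergeHead (cb, cp, cn) ((decide (v = 1), q) :: rest)
          = (cb, cp, cn) :: (decide (v = 1), q) :: rest := by
        simp [pvMergeHead]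
        intro hc; exact absurd hc.symm h
      rw [hm]
      simp

theorem pvWF_cons (k : Int) (ob : Option Bool) (b : Bool) (p n : Int) (rest : List (Bool × Int × Int)) :
    pvWF k ob ((b, p, n) :: rest) ↔ (p = k ∧ 1 ≤ n ∧ ob ≠ some b ∧ pvWF (k + n) (some b) rest) :=
  Iff.rfl

-- the run-length encoding is well formed
theorem pvWF_rle : ∀ (t : List Int) (k : Int), pvWF k none (pvRle k t) := by
  intro t
  induction t with
  | nil => intro k; simp [pvRle, pvWF]
  | cons v t ih =>
    intro k
    simp only [pvRle]
    have h := ih (k + 1)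
    cases hr : pvRle (k + 1) t with
    | nil => simp [pvMergeHead, pvWF]
    | cons x rest =>
      obtain ⟨xb, xp, xn⟩ := x
      rw [hr, pvWF_cons] at h
      obtain ⟨hp, hn, -, hwf⟩ := h
      subst hp
      by_cases hk : xb = decide (v = 1)
      · rw [← hk]
        have hme : pvMergeHead (xb, k, 1) ((xb, k + 1, xn) :: rest) = (xb, k, 1 + xn) :: rest := by
          simp [pvMergeHead]
        rw [hme, pvWF_cons]
        refine ⟨rfl, by omega, by simp, ?_⟩
        have he : k + (1 + xn) = (k + 1) + xn := by omega
        rw [he]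
        exact hwf
      · have hme : pvMergeHead (decide (v = 1), k, 1) ((xb, k + 1, xn) :: rest)
            = (decide (v = 1), k, 1) :: (xb, k + 1, xn) :: rest := by
          simp [pvMergeHead, hk]
        rw [hme, pvWF_cons]
        refine ⟨rfl, le_refl 1, by simp, ?_⟩
        rw [pvWF_cons]
        exact ⟨by omega, hn, by simp [Ne.symm hk], hwf⟩

theorem pvConsec_succ (p : Int) (m : Nat) : pvConsec p (m + 1) = p :: pvConsec (p + 1) m := rfl

-- the ones of the run-length encoding are the ones of the list
theorem pvRunsOnes_rle : ∀ (t : List Int) (k : Int), pvRunsOnes (pvRle k t) = pvOnes k t := by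
  intro t
  induction t with
  | nil => intro k; simp [pvRle, pvRunsOnes, pvOnes]
  | cons v t ih =>
    intro k
    simp only [pvRle, pvOnes]
    have ih' := ih (k + 1)
    have hwf := pvWF_rle t (k + 1)
    rw [← ih']
    cases hr : pvRle (k + 1) t with
    | nil => by_cases hv : v = 1 <;> simp [hv, pvMergeHead, pvRunsOnes, pvConsec]
    | cons x rest =>
      obtain ⟨xb, xp, xn⟩ := x
      rw [hr] at hwf
      rw [pvWF_cons] at hwf
      obtain ⟨hp, hn, -, -⟩ := hwf
      subst hp
      have htn : (1 + xn).toNat = xn.toNat + 1 := by omega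
      by_cases hv : v = 1
      · subst hv
        simp only [decide_true]
        cases xb with
        | true =>
          have hme : pvMergeHead (true, k, 1) ((true, k + 1, xn) :: rest) = (true, k, 1 + xn) :: rest := by
            simp [pvMergeHead]
          rw [hme]
          simp only [pvRunsOnes]
          rw [htn, pvConsec_succ]
          simp
        | false =>
          have hme : pvMergeHead (true, k, 1) ((false, k + 1, xn) :: rest)
              = (true, k, 1) :: (false, k + 1, xn) :: rest := by
            simp [pvMergeHead]
          rw [hme]
          simp [pvRunsOnes, pvConsec]
      · simp only [hv, decide_false]
        cases xb with
        | true =>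
          have hme : pvMergeHead (false, k, 1) ((true, k + 1, xn) :: rest)
              = (false, k, 1) :: (true, k + 1, xn) :: rest := by
            simp [pvMergeHead]
          rw [hme]
          simp [pvRunsOnes]
        | false =>
          have hme : pvMergeHead (false, k, 1) ((false, k + 1, xn) :: rest) = (false, k, 1 + xn) :: rest := by
            simp [pvMergeHead]
          rw [hme]
          simp [pvRunsOnes]

-- scanning consecutive ones produces no gaps
theorem pvGaps_consec (m : Nat) : ∀ (q : Int) (tail : List Int),
    pvGaps q (pvConsec (q + 1) m ++ tail) = pvGaps (q + m) tail := by
  induction m with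
  | zero => intro q tail; simp [pvConsec]
  | succ m ih =>
    intro q tail
    rw [pvConsec_succ]
    simp only [List.cons_append, pvGaps]
    rw [if_neg (by omega)]
    rw [ih (q + 1) tail]
    have : q + 1 + (m : Int) = q + ((m : Nat) + 1 : Nat) := by push_cast; ring
    simp only [List.nil_append, this]

-- main correspondence: gaps after a one at k-1 = interior emissions of a run list
theorem pvG1 : ∀ (n : Nat) (rs : List (Bool × Int × Int)) (k : Int), rs.length ≤ n →
    pvWF k (some true) rs →
    pvGaps (k - 1) (pvRunsOnes rs) = rs.dropLast.filterMap pvH := by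
  intro n
  induction n with
  | zero =>
    intro rs k hlen _
    have : rs = [] := List.eq_nil_of_length_eq_zero (Nat.le_zero.mp hlen)
    subst this; simp [pvRunsOnes, pvGaps]
  | succ n ih =>
    intro rs k hlen hwf
    cases rs with
    | nil => simp [pvRunsOnes, pvGaps]
    | cons r rest =>
      obtain ⟨b, p, m⟩ := r
      simp only [pvWF] at hwf
      obtain ⟨hp, hm, hob, hwf'⟩ := hwf
      have hb : b = false := by cases b with | false => rfl | true => exact absurd rfl hob
      subst hb; subst hp
      cases rest with
      | nil => simp [pvRunsOnes, pvGaps]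
      | cons x rest2 =>
        obtain ⟨b2, p2, m2⟩ := x
        simp only [pvWF] at hwf'
        obtain ⟨hp2, hm2, hob2, hwf2⟩ := hwf'
        have hb2 : b2 = true := by cases b2 with | false => exact absurd rfl hob2 | true => rfl
        subst hb2; subst hp2
        simp only [pvRunsOnes, Bool.false_eq_true, if_false, if_true, List.nil_append]
        have hm2' : m2.toNat = (m2 - 1).toNat + 1 := by omega
        rw [hm2', pvConsec_succ]
        simp only [List.cons_append, pvGaps]
        rw [if_pos (by omega)]
        rw [pvGaps_consec (m2 - 1).toNat (p + m) (pvRunsOnes rest2)]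
        have hc : p + m + ((m2 - 1).toNat : Int) = (p + m + m2) - 1 := by omega
        rw [hc]
        rw [ih rest2 (p + m + m2) (by simp at hlen ⊢; omega) hwf2]
        cases rest2 with
        | nil => simp [pvH]
        | cons y rest3 =>
          simp only [List.dropLast_cons₂, List.filterMap_cons]
          simp [pvH]

-- assembly: headless gaps of the ones = interior emissions, for a well-formed run list
theorem pvAssemble (rs : List (Bool × Int × Int)) (k : Int) (hwf : pvWF k none rs) :
    pvPairGaps (pvRunsOnes rs) = (rs.tail.dropLast).filterMap pvH := by
  cases rs with
  | nil => simp [pvRunsOnes, pvPairGaps]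
  | cons r rest =>
    obtain ⟨b, p, m⟩ := r
    simp only [pvWF] at hwf
    obtain ⟨hp, hm, -, hwf'⟩ := hwf
    subst hp
    cases b with
    | false =>
      -- first run is not ones: it contributes no one-indices
      simp only [pvRunsOnes, Bool.false_eq_true, if_false, List.nil_append, List.tail_cons]
      cases rest with
      | nil => simp [pvRunsOnes, pvPairGaps]
      | cons x rest2 =>
        obtain ⟨b2, p2, m2⟩ := x
        simp only [pvWF] at hwf'
        obtain ⟨hp2, hm2, hob2, hwf2⟩ := hwf'
        have hb2 : b2 = true := by cases b2 with | false => exact absurd rfl hob2 | true => rfl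
        subst hb2; subst hp2
        simp only [pvRunsOnes, if_true]
        have hm2' : m2.toNat = (m2 - 1).toNat + 1 := by omega
        rw [hm2', pvConsec_succ]
        simp only [List.cons_append, pvPairGaps]
        rw [pvGaps_consec (m2 - 1).toNat (p + m) (pvRunsOnes rest2)]
        have hc : p + m + ((m2 - 1).toNat : Int) = (p + m + m2) - 1 := by omega
        rw [hc]
        rw [pvG1 rest2.length rest2 (p + m + m2) (le_refl _) hwf2]
        cases rest2 with
        | nil => simp
        | cons y rest3 =>
          simp only [List.dropLast_cons₂, List.filterMap_cons]
          simp [pvH]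
    | true =>
      -- first run is ones: consume it, then pvG1
      simp only [pvRunsOnes, if_true]
      have hm' : m.toNat = (m - 1).toNat + 1 := by omega
      rw [hm', pvConsec_succ]
      simp only [List.cons_append, pvPairGaps, List.tail_cons]
      rw [pvGaps_consec (m - 1).toNat p (pvRunsOnes rest)]
      have hc : p + ((m - 1).toNat : Int) = (p + m) - 1 := by omega
      rw [hc]
      exact pvG1 rest.length rest (p + m) (le_refl _) hwf'

-- runs[1:-1] is tail + dropLast
theorem pvSlice11 (rs : List (Bool × Int × Int)) :
    PySem.List.slice rs (some 1) (some (-1)) = rs.tail.dropLast := by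
  rcases rs with _ | ⟨a, t⟩
  · simp [PySem.List.slice, PySem.List.clampIdx]
  · have h : ¬((t.length : Int) < 0) := Int.not_lt.mpr (Int.natCast_nonneg _)
    simp [PySem.List.slice, PySem.List.clampIdx, List.dropLast_eq_take, h]

-- ===== VERDICT (by name: the statement is the Claim_ definition above) =====
theorem get_stretches_of_zeros_spec : Claim_equal_get_stretches_of_zeros := by
  intro l _
  unfold Spec_get_stretches_of_zeros get_stretches_of_zeros get_stretches_of_zeros_alt
  rw [PySem.List.foldl_congr_mem (g := fun (st : List (List Int) × Int) (iv : Int × Int) =>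
        if iv.2 = 1 then
          ((if st.2 < iv.1 - 1 then st.1 ++ [[st.2, iv.1]] else st.1), iv.1)
        else st)]
  · rw [pvA_fold]
    simp only [List.nil_append]
    have estep : (fun (st : List (Bool × Int × Int) × Option (Bool × Int × Int)) (iv : Int × Int) =>
        let k : Bool := decide (iv.2 = 1)
        match st.2 with
        | some c =>
          if c.1 = k then (st.1, some (c.1, c.2.1, c.2.2 + 1))
          else (st.1 ++ [c], some (k, iv.1, 1))
        | none => (st.1, some (k, iv.1, 1))) = pvStep := rfl
    rw [estep]
    have eh : (fun (r : Bool × Int × Int) =>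
        if r.1 then none else some [r.2.1 - 1, r.2.1 + r.2.2]) = pvH := rfl
    rw [eh]
    cases l with
    | nil => simp [PySem.List.enumerate_nil, pvOnes, pvGaps, PySem.List.slice]
    | cons v t =>
      rw [PySem.List.enumerate_cons]
      simp only [List.foldl_cons]
      have h0 : pvStep ([], none) (0, v) = ([], some (decide (v = 1), 0, 1)) := rfl
      rw [h0]
      simp only [zero_add]
      rw [pvSlice11, pvB_fold t 1 [] (decide (v = 1), 0, 1)]
      have hrle : ([] : List (Bool × Int × Int)) ++ pvMergeHead (decide (v = 1), 0, 1) (pvRle 1 t)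
          = pvRle 0 (v :: t) := by
        simp [pvRle]
      rw [hrle]
      rw [pvGaps_sentinel _ _ ?_]
      · rw [← pvRunsOnes_rle (v :: t) 0]
        exact pvAssemble _ 0 (pvWF_rle (v :: t) 0)
      · intro x hx
        have := pvOnes_lt (k := 0) hx
        simp only [List.length_cons] at this ⊢
        push_cast at this ⊢
        omega
  · intro acc x hx
    rw [PySem.List.mem_enumerate_iff] at hx
    obtain ⟨k, hk, rfl⟩ := hx
    simp [PySem.List.pyGet?_natCast, List.getElem?_eq_getElem hk]
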